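-- pv_equiv track=rewrite | github.com/matthewzhaocc/EmbyDatabaseBot | src/mandrake/bot/commands/__init__.py | next_arg
-- ===== SOURCE A (Python) =====
-- from typing import Tuple, Optional, Union
--
-- def find_with_predicate(s: str, pred) -> int:
--     for i, v in enumerate(s):
--         if pred(v):
--             return i
--     return -1
--
-- def next_arg(arg_string: str) -> Tuple[str, Optional[str]]:
--     # A basic quoted-arg parser
--
--     for quote in "“‟”":
--         arg_string = arg_string.replace(quote, "\"")
--
--     if arg_string.startswith("\""):
--         end_quote = arg_string[1:].find("\"") + 1
--         if end_quote > 0: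
--             return arg_string[1:end_quote], arg_string[end_quote + 1:].strip()
--         else:
--             return arg_string[1:], None
--
--     next_space = find_with_predicate(arg_string, lambda ch: ch.isspace())
--     if next_space >= 0:
--         return arg_string[:next_space].strip(), arg_string[next_space:].strip()
--     else:
--         return arg_string.strip(), None
-- ===== SOURCE B (Python) =====
-- import re
-- from typing import Tuple, Optional
--
-- # One compiled pattern, three ordered alternatives:
-- #   (1) a closed quoted token: "body" + remainder
-- #   (2) an open quoted token:  " + remainder (no closing quote)
-- #   (3) a bare \S* token + remainder
-- _TOKEN = re.compile(r'"([^"]*)"(.*)|"(.*)|(\S*)(.*)', re.DOTALL)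
--
--
-- def next_arg(arg_string: str) -> Tuple[str, Optional[str]]:
--     for quote in "“‟”":
--         arg_string = arg_string.replace(quote, "\"")
--
--     m = _TOKEN.match(arg_string)
--     if m.group(1) is not None:          # closed quote
--         return m.group(1), m.group(2).strip()
--     if m.group(3) is not None:          # unclosed quote: rest is kept verbatim
--         return m.group(3), None
--     rest = m.group(5)
--     return m.group(4), (rest.strip() if rest else None)
-- ===== Notes on version B (the rewrite author's own statement) =====
-- stated objective: idiomatic
-- what changed: Replaces A's hand-rolled index hunting (find on a slice, a helper scanning enumerate for whitespace, manual slicing) with a single compiled regex whose three ordered alternatives (closed-quote token | open-quote remainder | bare \S* token) yield first and rest directly from the match groups; the C regex engine replaces the Python-level per-character scan.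
import Mathlib
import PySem

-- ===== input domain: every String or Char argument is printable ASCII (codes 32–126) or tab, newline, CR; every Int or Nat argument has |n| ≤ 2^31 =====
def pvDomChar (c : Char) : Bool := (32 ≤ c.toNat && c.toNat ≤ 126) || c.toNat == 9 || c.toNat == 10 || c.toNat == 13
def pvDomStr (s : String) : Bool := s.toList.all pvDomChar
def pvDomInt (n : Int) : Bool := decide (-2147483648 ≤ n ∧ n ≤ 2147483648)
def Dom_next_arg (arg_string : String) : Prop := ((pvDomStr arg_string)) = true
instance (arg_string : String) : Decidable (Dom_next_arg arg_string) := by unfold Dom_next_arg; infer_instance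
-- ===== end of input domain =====

-- B re-implements the parser as one regex match (quoted token | open quote | bare token) instead of
-- A's index-finding and slicing; objective: idiomatic (measured faster by a constant factor).

-- ===== PORT A =====
def findWithPredicateGo (pred : Char → Bool) : List (Int × Char) → Int
  | [] => -1
  | (i, v) :: t => if pred v then i else findWithPredicateGo pred t

def find_with_predicate (s : String) (pred : Char → Bool) : Int :=
  findWithPredicateGo pred (PySem.List.enumerate s.toList)

def next_arg (arg_string : String) : String × Option String :=
  let s := PySem.Str.replace (PySem.Str.replace (PySem.Str.replace arg_string "“" "\"") "‟" "\"") "”" "\""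
  if PySem.Str.startswith s "\"" then
    let end_quote := PySem.Str.find (PySem.Str.slice s (some 1) none) "\"" + 1
    if end_quote > 0 then
      (PySem.Str.slice s (some 1) (some end_quote),
       some (PySem.Str.strip (PySem.Str.slice s (some (end_quote + 1)) none)))
    else
      (PySem.Str.slice s (some 1) none, none)
  else
    let next_space := find_with_predicate s (fun ch => PySem.Chars.isspace ch)
    if next_space ≥ 0 then
      (PySem.Str.strip (PySem.Str.slice s none (some next_space)),
       some (PySem.Str.strip (PySem.Str.slice s (some next_space) none)))
    else
      (PySem.Str.strip s, none)

-- ===== PORT B =====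
-- Hand port of Source B's single compiled regex  r'"([^"]*)"(.*)|"(.*)|(\S*)(.*)'  (DOTALL) applied with
-- re.match: the three ordered alternatives are compiled exactly — (1) closed quote: body up to the
-- first '"' of the tail plus the rest behind it; (2) open quote (no '"' in the tail): the whole tail;
-- (3) \S* token plus remainder ('\S' = not isspace, exactly Python's str.isspace class).
def next_arg_alt (arg_string : String) : String × Option String :=
  let s := PySem.Str.replace (PySem.Str.replace (PySem.Str.replace arg_string "“" "\"") "‟" "\"") "”" "\""
  match s.toList with
  | '"' :: rest =>
    let body := rest.takeWhile (fun c => !(c == '"'))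
    match rest.dropWhile (fun c => !(c == '"')) with
    | _ :: tail => (String.ofList body, some (PySem.Str.strip (String.ofList tail)))
    | [] => (String.ofList body, none)
  | cs =>
    let tok := cs.takeWhile (fun c => !(PySem.Chars.isspace c))
    let rest := cs.dropWhile (fun c => !(PySem.Chars.isspace c))
    (String.ofList tok, if rest.isEmpty then none else some (PySem.Str.strip (String.ofList rest)))

-- ===== PRECONDITION & SPEC =====
def Spec_next_arg (arg_string : String) (out : String × Option String) : Prop := out = next_arg_alt arg_string
instance (arg_string : String) (out : String × Option String) : Decidable (Spec_next_arg arg_string out) := by unfold Spec_next_arg; infer_instance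

-- ===== CLAIM (what is proved, stated in full; the proofs are below) =====
def Claim_equal_next_arg : Prop := ∀ (arg_string : String), Dom_next_arg arg_string → Spec_next_arg arg_string (next_arg arg_string)

-- ===== LEMMAS AND PROOFS =====

theorem slice_one_succ (xs : List Char) (x : Char) (j : Nat) :
    PySem.List.slice (x :: xs) (some 1) (some ((j : Int) + 1)) = xs.take j := by
  have h1 : ((j : Int) + 1) = ((j + 1 : Nat) : Int) := by push_cast; ring
  rw [h1, show (1 : Int) = ((1 : Nat) : Int) from rfl, PySem.List.slice_natCast]
  simp

theorem slice_from_succ_succ (xs : List Char) (x : Char) (j : Nat) :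
    PySem.List.slice (x :: xs) (some ((j : Int) + 1 + 1)) none = xs.drop (j + 1) := by
  have h1 : ((j : Int) + 1 + 1) = ((j + 2 : Nat) : Int) := by push_cast; ring
  rw [h1, PySem.List.slice_from_natCast]
  simp [List.drop_succ_cons]

theorem singleton_prefix_drop (c : Char) (l : List Char) (k : Nat) :
    [c] <+: l.drop k ↔ l[k]? = some c := by
  rw [← List.head?_drop]
  constructor
  · rintro ⟨t, ht⟩
    cases h : List.drop k l with
    | nil => simp [h] at ht
    | cons a t' => rw [h] at ht; cases ht; simp
  · intro h
    cases hd : List.drop k l with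
    | nil => simp [hd] at h
    | cons a t' =>
      rw [hd] at h; simp at h
      exact ⟨t', by simp [h]⟩

theorem find_singleton (l : List Char) (c : Char) :
    PySem.Chars.find l [c] =
      if l.findIdx (· == c) < l.length then ((l.findIdx (· == c) : Nat) : Int) else -1 := by
  by_cases hmem : c ∈ l
  · have hlt : l.findIdx (· == c) < l.length :=
      List.findIdx_lt_length.mpr ⟨c, hmem, by simp⟩
    have hinf : [c] <:+: l := by
      obtain ⟨s, t, rfl⟩ := List.append_of_mem hmem
      exact ⟨s, t, by simp⟩
    have hnn : 0 ≤ PySem.Chars.find l [c] := (PySem.Chars.find_nonneg_iff l [c]).mpr hinf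
    obtain ⟨hpref, hmin⟩ := PySem.Chars.find_spec (s := l) (sub := [c]) hnn
    have hgk : l[(PySem.Chars.find l [c]).toNat]? = some c :=
      (singleton_prefix_drop c l _).mp hpref
    have hklt : (PySem.Chars.find l [c]).toNat < l.length := by
      by_contra hge
      rw [List.getElem?_eq_none (by omega)] at hgk; cases hgk
    have h1 : l.findIdx (· == c) ≤ (PySem.Chars.find l [c]).toNat := by
      by_contra hgt
      have := List.not_of_lt_findIdx (p := (· == c)) (xs := l)
        (i := (PySem.Chars.find l [c]).toNat) (by omega)
      rw [List.getElem?_eq_getElem hklt] at hgk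
      simp at hgk this
      exact this hgk
    have h2 : (PySem.Chars.find l [c]).toNat ≤ l.findIdx (· == c) := by
      by_contra hgt
      apply hmin (l.findIdx (· == c)) (by omega)
      rw [singleton_prefix_drop, List.getElem?_eq_getElem hlt]
      have := @List.findIdx_getElem _ (· == c) l hlt
      simpa using this
    have : (PySem.Chars.find l [c]).toNat = l.findIdx (· == c) := le_antisymm h2 h1
    rw [if_pos hlt]
    omega
  · have h1 : PySem.Chars.find l [c] = -1 := by
      rw [PySem.Chars.find_eq_neg_one_iff]
      intro hinf
      exact hmem (hinf.subset (by simp))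
    have h2 : l.findIdx (· == c) = l.length :=
      List.findIdx_eq_length.mpr (fun x hx => by
        simp only [beq_eq_false_iff_ne]; rintro rfl; exact hmem hx)
    simp [h1, h2]

theorem go_enumerate (pred : Char → Bool) (l : List Char) (n : Int) :
    findWithPredicateGo pred (PySem.List.enumerate l n) =
      if l.findIdx pred < l.length then n + (l.findIdx pred : Nat) else -1 := by
  induction l generalizing n with
  | nil => simp [PySem.List.enumerate_nil, findWithPredicateGo]
  | cons x t ih =>
    rw [PySem.List.enumerate_cons]
    by_cases hx : pred x
    · simp [findWithPredicateGo, hx, List.findIdx_cons]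
    · simp only [findWithPredicateGo, hx, ih, List.findIdx_cons, Bool.cond_eq_ite]
      by_cases hlt : t.findIdx pred < t.length
      · simp [hlt]; ring
      · simp [hlt]

theorem strip_of_no_space (l : List Char) (h : ∀ c ∈ l, PySem.Chars.isspace c = false) :
    PySem.Chars.strip l = l := by
  have hd : ∀ (m : List Char), (∀ c ∈ m, PySem.Chars.isspace c = false) →
      List.dropWhile PySem.Chars.isspace m = m := by
    intro m hm
    cases m with
    | nil => rfl
    | cons a t => simp [hm a (by simp)]
  unfold PySem.Chars.strip PySem.Chars.lstrip PySem.Chars.rstrip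
  rw [hd l h, hd l.reverse (fun c hc => h c (List.mem_reverse.mp hc)), List.reverse_reverse]

-- ===== VERDICT (by name: the statement is the Claim_ definition above) =====
theorem next_arg_spec : Claim_equal_next_arg := by
  intro s _
  unfold Spec_next_arg
  show next_arg s = next_arg_alt s
  unfold next_arg next_arg_alt
  generalize (PySem.Str.replace (PySem.Str.replace (PySem.Str.replace s "\u201c" "\"") "\u201f" "\"") "\u201d" "\"") = t
  cases h : t.toList with
  | nil =>
    simp [PySem.Str.startswith, PySem.Chars.startswith, h, find_with_predicate,
          findWithPredicateGo, PySem.List.enumerate_nil, PySem.Str.strip, PySem.Chars.strip,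
          PySem.Chars.lstrip, PySem.Chars.rstrip]
  | cons a r =>
    by_cases ha : a = '"'
    · subst ha
      have hsw : PySem.Str.startswith t "\"" = true := by
        simp [PySem.Str.startswith, PySem.Chars.startswith, h, List.isPrefixOf]
      have hq : ("\"" : String).toList = ['"'] := rfl
      have hslice : (PySem.Str.slice t (some 1)).toList = r := by
        simp [PySem.Str.slice, h, PySem.List.slice_from_one]
      have hfindeq : PySem.Str.find (PySem.Str.slice t (some 1)) "\"" = PySem.Chars.find r ['"'] := by
        simp [PySem.Str.find, hslice, hq]
      by_cases hk : r.findIdx (· == '"') < r.length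
      · have hfind : PySem.Chars.find r ['"'] = ((r.findIdx (· == '"') : Nat) : Int) := by
          rw [find_singleton, if_pos hk]
        have hdw : List.dropWhile (fun c => !(c == '"')) r =
            r[r.findIdx (· == '"')] :: r.drop (r.findIdx (· == '"') + 1) := by
          rw [List.dropWhile_eq_drop_findIdx_not]
          simp only [Bool.not_not]
          exact List.drop_eq_getElem_cons hk
        have htw : List.takeWhile (fun c => !(c == '"')) r = r.take (r.findIdx (· == '"')) := by
          rw [List.takeWhile_eq_take_findIdx_not]
          simp only [Bool.not_not]
        simp only [hsw, if_true, hfindeq, hfind, h, hdw, htw]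
        rw [if_pos (by omega)]
        simp [PySem.Str.slice, h, slice_one_succ, slice_from_succ_succ]
      · have hfind : PySem.Chars.find r ['"'] = -1 := by
          rw [find_singleton, if_neg hk]
        have hkl : r.findIdx (· == '"') = r.length :=
          le_antisymm List.findIdx_le_length (not_lt.mp hk)
        have hdw : List.dropWhile (fun c => !(c == '"')) r = [] := by
          rw [List.dropWhile_eq_drop_findIdx_not]
          simp only [Bool.not_not]
          simp [hkl]
        have htw : List.takeWhile (fun c => !(c == '"')) r = r := by
          rw [List.takeWhile_eq_take_findIdx_not]
          simp only [Bool.not_not]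
          simp [hkl]
        simp only [hsw, if_true, hfindeq, hfind, h, hdw, htw]
        norm_num
        simp [PySem.Str.slice, PySem.Chars.slice_eq_listSlice, h, PySem.List.slice_from_one]
    · have hbne : ('"' == a) = false := by
        simp only [beq_eq_false_iff_ne]; exact fun e => ha e.symm
      have hsw : PySem.Str.startswith t "\"" = false := by
        simp [PySem.Str.startswith, PySem.Chars.startswith, h, List.isPrefixOf, hbne]
      have hfp : (find_with_predicate t fun ch => PySem.Chars.isspace ch) =
          (if (a :: r).findIdx PySem.Chars.isspace < (a :: r).length
           then (((a :: r).findIdx PySem.Chars.isspace : Nat) : Int) else -1) := by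
        unfold find_with_predicate
        rw [h, go_enumerate]
        split <;> simp
      have htw : List.takeWhile (fun c => !(PySem.Chars.isspace c)) (a :: r) =
          List.take ((a :: r).findIdx PySem.Chars.isspace) (a :: r) := by
        rw [List.takeWhile_eq_take_findIdx_not]; simp only [Bool.not_not]
      have hdw : List.dropWhile (fun c => !(PySem.Chars.isspace c)) (a :: r) =
          List.drop ((a :: r).findIdx PySem.Chars.isspace) (a :: r) := by
        rw [List.dropWhile_eq_drop_findIdx_not]; simp only [Bool.not_not]
      have hst : PySem.Chars.strip (List.take ((a :: r).findIdx PySem.Chars.isspace) (a :: r)) =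
          List.take ((a :: r).findIdx PySem.Chars.isspace) (a :: r) := by
        apply strip_of_no_space
        intro c hc
        rw [← htw] at hc
        simpa using List.mem_takeWhile_imp hc
      simp only [hsw, h]
      rw [if_neg (by simp)]
      split
      · rename_i hge
        have hj : (a :: r).findIdx PySem.Chars.isspace < (a :: r).length := by
          by_contra hc
          rw [hfp, if_neg hc] at hge
          omega
        rw [hfp, if_pos hj]
        split
        · rename_i rest heq
          injection heq with h1 _
          exact absurd h1 ha
        · have hne : (List.drop ((a :: r).findIdx PySem.Chars.isspace) (a :: r)).isEmpty = false := by
            apply List.isEmpty_eq_false_iff.mpr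
            rw [Ne, List.drop_eq_nil_iff]
            omega
          rw [htw, hdw, hne]
          simp [PySem.Str.slice, PySem.Str.strip, h, PySem.List.slice_to_natCast,
                PySem.List.slice_from_natCast, hst]
      · rename_i hge
        have hj : ¬ ((a :: r).findIdx PySem.Chars.isspace < (a :: r).length) := by
          intro hc
          rw [hfp, if_pos hc] at hge
          exact hge (by positivity)
        have hjl : (a :: r).findIdx PySem.Chars.isspace = (a :: r).length :=
          le_antisymm List.findIdx_le_length (not_lt.mp hj)
        split
        · rename_i rest heq
          injection heq with h1 _
          exact absurd h1 ha
        · rw [htw, hdw, hjl]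
          have hall : PySem.Chars.strip (a :: r) = a :: r :=
            strip_of_no_space _ (fun c hc => List.findIdx_eq_length.mp hjl c hc)
          simp [PySem.Str.strip, h, hall, List.take_length, List.drop_length]
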